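-- pv_equiv track=rewrite | github.com/Davvid01/python | nauka/kalkulator_kot.py | cat_age
-- ===== SOURCE A (Python) =====
-- def cat_age(age):
--     if age<2:
--         return f"Marion ma {age*12+1} lat i jest kitten"
--     elif age in range(2,10):
--         wiek=20
--         for x in range(2,age+1):
--             wiek+=5
--         return f"Kot ma {wiek} lat i jest adult"
--     else:
--         wiek=60
--         for x in range(10,age+1):
--             wiek+=5
--         return f"Kot ma {wiek} lat i jest seniorką"
-- ===== SOURCE B (Python) =====
-- def cat_age(age):
--     if age < 2:
--         return f"Marion ma {age*12+1} lat i jest kitten"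
--     kind = "adult" if age < 10 else "seniork\u0105"
--     return f"Kot ma {5*age+15} lat i jest {kind}"
-- ===== Notes on version B (the rewrite author's own statement) =====
-- stated objective: faster
-- what changed: replaced both per-year accumulation loops over range(...) by a single closed-form linear expression (identical for the adult and senior branches), selecting only the label by a comparison
import Mathlib
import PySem

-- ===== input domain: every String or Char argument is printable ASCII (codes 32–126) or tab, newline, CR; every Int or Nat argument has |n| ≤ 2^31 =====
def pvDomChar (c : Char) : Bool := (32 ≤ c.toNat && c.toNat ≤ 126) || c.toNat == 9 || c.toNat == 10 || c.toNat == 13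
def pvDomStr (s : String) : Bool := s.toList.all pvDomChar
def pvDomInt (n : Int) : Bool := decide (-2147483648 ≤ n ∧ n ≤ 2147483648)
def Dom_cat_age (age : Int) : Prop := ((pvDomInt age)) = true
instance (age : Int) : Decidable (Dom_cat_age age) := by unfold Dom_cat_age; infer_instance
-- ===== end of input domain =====

-- B replaces A's per-year +5 accumulation loops with the closed form 5*age+15 (O(1) instead of O(age)).

-- ===== PORT A =====
def cat_age (age : Int) : String :=
  if age < 2 then
    "Marion ma " ++ PySem.Int.toStr (age * 12 + 1) ++ " lat i jest kitten"
  else if 2 ≤ age ∧ age < 10 then  -- `age in range(2,10)` for an int argument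
    let wiek := (PySem.List.pyRange 2 (age + 1) 1).foldl (fun w _ => w + 5) 20
    "Kot ma " ++ PySem.Int.toStr wiek ++ " lat i jest adult"
  else
    let wiek := (PySem.List.pyRange 10 (age + 1) 1).foldl (fun w _ => w + 5) 60
    "Kot ma " ++ PySem.Int.toStr wiek ++ " lat i jest seniorką"

-- ===== PORT B =====
def cat_age_alt (age : Int) : String :=
  if age < 2 then
    "Marion ma " ++ PySem.Int.toStr (age * 12 + 1) ++ " lat i jest kitten"
  else
    let kind := if age < 10 then "adult" else "seniorką"
    "Kot ma " ++ PySem.Int.toStr (5 * age + 15) ++ " lat i jest " ++ kind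

-- ===== PRECONDITION & SPEC =====
def Spec_cat_age (age : Int) (out : String) : Prop := out = cat_age_alt age
instance (age : Int) (out : String) : Decidable (Spec_cat_age age out) := by unfold Spec_cat_age; infer_instance

-- ===== CLAIM (what is proved, stated in full; the proofs are below) =====
def Claim_equal_cat_age : Prop := ∀ (age : Int), Dom_cat_age age → Spec_cat_age age (cat_age age)

-- ===== LEMMAS AND PROOFS =====

/-- Folding `+5` over a list adds `5 * length`. -/
theorem foldl_add_five (l : List Int) (init : Int) :
    l.foldl (fun w _ => w + 5) init = init + 5 * l.length := by
  induction l generalizing init with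
  | nil => simp
  | cons a t ih => simp [List.foldl, ih]; ring

theorem foldl_pyRange_add_five (a b : Int) (init : Int) :
    (PySem.List.pyRange a b 1).foldl (fun w _ => w + 5) init = init + 5 * (b - a).toNat := by
  rw [foldl_add_five, PySem.List.length_pyRange_one]

-- ===== VERDICT (by name: the statement is the Claim_ definition above) =====
theorem cat_age_spec : Claim_equal_cat_age := by
  intro age _
  unfold Spec_cat_age cat_age cat_age_alt
  by_cases h2 : age < 2
  · simp [h2]
  · by_cases h10 : age < 10
    · have hc : 2 ≤ age ∧ age < 10 := ⟨by omega, h10⟩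
      rw [if_neg h2, if_pos hc, if_neg h2, if_pos h10, foldl_pyRange_add_five]
      have : (20 : Int) + 5 * ((age + 1 - 2).toNat : Int) = 5 * age + 15 := by
        have h : ((age + 1 - 2).toNat : Int) = age - 1 := by omega
        rw [h]; ring
      rw [this]
      show ("Kot ma " ++ PySem.Int.toStr (5 * age + 15) ++ " lat i jest adult") =
        "Kot ma " ++ PySem.Int.toStr (5 * age + 15) ++ " lat i jest " ++ "adult"
      have hs : (" lat i jest " ++ "adult" : String) = " lat i jest adult" := by decide
      rw [String.append_assoc, String.append_assoc, hs]
      rw [String.append_assoc]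
    · have hc : ¬ (2 ≤ age ∧ age < 10) := by omega
      rw [if_neg h2, if_neg hc, if_neg h2, if_neg h10, foldl_pyRange_add_five]
      have : (60 : Int) + 5 * ((age + 1 - 10).toNat : Int) = 5 * age + 15 := by
        have h : ((age + 1 - 10).toNat : Int) = age - 9 := by omega
        rw [h]; ring
      rw [this]
      show ("Kot ma " ++ PySem.Int.toStr (5 * age + 15) ++ " lat i jest seniorką") =
        "Kot ma " ++ PySem.Int.toStr (5 * age + 15) ++ " lat i jest " ++ "seniorką"
      have hs : (" lat i jest " ++ "seniorką" : String) = " lat i jest seniorką" := by decide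
      rw [String.append_assoc, String.append_assoc, hs]
      rw [String.append_assoc]
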